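-- pv_equiv track=rewrite | github.com/OrbitWon45/git_hw | home_assignment_4.py | sum_even_and_product_odd
-- ===== SOURCE A (Python) =====
-- def sum_even_and_product_odd(arr: list):
--     sum_even = 0
--     product_odd = 1
--     for i in arr:
--         if i % 2 == 0:
--             sum_even += i
--         else:
--             product_odd *= i
--     return [sum_even, product_odd]
-- ===== SOURCE B (Python) =====
-- def sum_even_and_product_odd(arr: list):
--     evens = [i for i in arr if i % 2 == 0]
--     odds = [i for i in arr if i % 2 != 0]
--     product_odd = 1
--     for i in odds:
--         product_odd *= i
--     return [sum(evens), product_odd]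
-- ===== Notes on version B (the rewrite author's own statement) =====
-- stated objective: alternative
-- what changed: Replaces A's single branching loop over a pair of accumulators with two independent filter passes, one aggregated by the sum builtin and one folded into a product.
import Mathlib
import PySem

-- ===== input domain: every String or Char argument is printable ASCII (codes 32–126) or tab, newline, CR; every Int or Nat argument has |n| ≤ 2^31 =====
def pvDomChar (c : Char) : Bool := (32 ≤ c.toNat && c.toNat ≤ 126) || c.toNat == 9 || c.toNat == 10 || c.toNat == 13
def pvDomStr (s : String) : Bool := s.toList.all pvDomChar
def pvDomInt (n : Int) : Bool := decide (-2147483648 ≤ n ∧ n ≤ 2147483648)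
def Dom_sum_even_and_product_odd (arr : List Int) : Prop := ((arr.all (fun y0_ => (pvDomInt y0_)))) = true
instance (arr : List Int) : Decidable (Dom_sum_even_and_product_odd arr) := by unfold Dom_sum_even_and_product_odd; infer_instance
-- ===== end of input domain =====

-- ===== PORT A =====
-- B: two independent filter passes (sum of evens, fold-product of odds) instead of A's single branching loop.
def sum_even_and_product_odd (arr : List Int) : List Int :=
  let sp := arr.foldl (fun (sp : Int × Int) i =>
    if PySem.Int.mod i 2 = 0 then (sp.1 + i, sp.2) else (sp.1, sp.2 * i)) (0, 1)
  [sp.1, sp.2]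

-- ===== PORT B =====
def sum_even_and_product_odd_alt (arr : List Int) : List Int :=
  let evens := arr.filter (fun i => PySem.Int.mod i 2 = 0)
  let odds := arr.filter (fun i => PySem.Int.mod i 2 ≠ 0)
  let product_odd := odds.foldl (· * ·) 1
  [evens.sum, product_odd]

-- ===== PRECONDITION & SPEC =====
def Spec_sum_even_and_product_odd (arr : List Int) (out : List Int) : Prop := out = sum_even_and_product_odd_alt arr
instance (arr : List Int) (out : List Int) : Decidable (Spec_sum_even_and_product_odd arr out) := by unfold Spec_sum_even_and_product_odd; infer_instance

-- ===== CLAIM (what is proved, stated in full; the proofs are below) =====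
def Claim_equal_sum_even_and_product_odd : Prop := ∀ (arr : List Int), Dom_sum_even_and_product_odd arr → Spec_sum_even_and_product_odd arr (sum_even_and_product_odd arr)

-- ===== LEMMAS AND PROOFS =====

-- ===== VERDICT (by name: the statement is the Claim_ definition above) =====
lemma pv_fold_split (arr : List Int) (s p : Int) :
    arr.foldl (fun (sp : Int × Int) i =>
      if PySem.Int.mod i 2 = 0 then (sp.1 + i, sp.2) else (sp.1, sp.2 * i)) (s, p)
    = (s + (arr.filter (fun i => PySem.Int.mod i 2 = 0)).sum,
       (arr.filter (fun i => PySem.Int.mod i 2 ≠ 0)).foldl (· * ·) p) := by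
  induction arr generalizing s p with
  | nil => simp
  | cons h t ih =>
    simp only [List.foldl_cons, List.filter_cons]
    by_cases hm : PySem.Int.mod h 2 = 0
    · rw [if_pos hm, if_pos (decide_eq_true hm),
          if_neg (by simp only [decide_eq_true_eq]; exact fun hc => hc hm),
          ih, List.sum_cons]
      ring_nf
    · rw [if_neg hm, if_neg (by simp only [decide_eq_true_eq]; exact hm),
          if_pos (decide_eq_true hm), ih, List.foldl_cons]

theorem sum_even_and_product_odd_spec : Claim_equal_sum_even_and_product_odd := by
  intro arr _
  unfold Spec_sum_even_and_product_odd sum_even_and_product_odd sum_even_and_product_odd_alt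
  simp only [pv_fold_split, zero_add]
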